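-- pv_equiv track=rewrite | github.com/valik94/PythonProblems | labs109.py | taxi_zum_zum
-- ===== SOURCE A (Python) =====
-- def taxi_zum_zum(moves):
--     pos, hed, dv = (0, 0), 0, [(0, 1), (-1, 0), (0, -1), (1, 0)]
--     for m in moves:
--         if m == 'R':
--             hed = (hed - 1) % 4
--         elif m == 'L':
--             hed = (hed + 1) % 4
--         else:
--             pos = (pos[0] + dv[hed][0], pos[1] + dv[hed][1])
--     return pos
-- ===== SOURCE B (Python) =====
-- def taxi_zum_zum(moves):
--     # Process the moves BACK-TO-FRONT: the accumulator is the displacement of the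
--     # suffix relative to its own starting heading (north). A preceding turn just
--     # rotates that whole suffix displacement; a preceding forward step adds one
--     # unit of north. No heading state and no direction table are needed.
--     x = y = 0
--     for m in reversed(moves):
--         if m == 'R':
--             x, y = y, -x
--         elif m == 'L':
--             x, y = -y, x
--         else:
--             y += 1
--     return (x, y)
-- ===== Notes on version B (the rewrite author's own statement) =====
-- stated objective: alternative
-- what changed: Instead of simulating forward with a heading index, a position and a direction table, B traverses the moves back-to-front with only a displacement accumulator: a turn rotates the whole suffix displacement and a forward step adds one unit north, exploiting that rotations act linearly on the rest of the path.
import Mathlib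
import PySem

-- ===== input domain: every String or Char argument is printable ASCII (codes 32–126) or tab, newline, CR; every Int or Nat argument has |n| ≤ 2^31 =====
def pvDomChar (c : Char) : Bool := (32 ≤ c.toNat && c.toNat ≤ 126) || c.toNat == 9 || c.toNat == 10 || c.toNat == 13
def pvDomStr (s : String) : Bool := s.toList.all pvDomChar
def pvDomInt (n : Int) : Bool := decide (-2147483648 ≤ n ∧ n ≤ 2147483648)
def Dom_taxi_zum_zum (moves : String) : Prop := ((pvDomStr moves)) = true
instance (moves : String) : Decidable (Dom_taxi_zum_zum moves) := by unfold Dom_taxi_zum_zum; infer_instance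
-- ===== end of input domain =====

-- B traverses the moves back-to-front with a single displacement accumulator (turns rotate the suffix displacement), instead of A's forward simulation with heading index + direction table; same O(n) cost.


-- ===== PORT A =====
-- dv = [(0, 1), (-1, 0), (0, -1), (1, 0)]
def pvDvA : List (Int × Int) := [(0, 1), (-1, 0), (0, -1), (1, 0)]

-- one iteration of A's loop over state (pos, hed); dv[hed] is pyGet? with a
-- default that is never reached (hed stays in 0..3, proved below)
def pvStepA (s : (Int × Int) × Int) (m : Char) : (Int × Int) × Int :=
  if m = 'R' then (s.1, PySem.Int.mod (s.2 - 1) 4)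
  else if m = 'L' then (s.1, PySem.Int.mod (s.2 + 1) 4)
  else
    let d := (PySem.List.pyGet? pvDvA s.2).getD (0, 0)
    ((s.1.1 + d.1, s.1.2 + d.2), s.2)

def taxi_zum_zum (moves : String) : Int × Int :=
  (moves.toList.foldl pvStepA ((0, 0), 0)).1

-- ===== PORT B =====
-- backward loop: 'R' maps (x,y) to (y,-x), 'L' to (-y,x), else y += 1
def pvStepB (s : Int × Int) (m : Char) : Int × Int :=
  if m = 'R' then (s.2, -s.1)
  else if m = 'L' then (-s.2, s.1)
  else (s.1, s.2 + 1)

def taxi_zum_zum_alt (moves : String) : Int × Int :=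
  moves.toList.reverse.foldl pvStepB (0, 0)

-- ===== PRECONDITION & SPEC =====
def Spec_taxi_zum_zum (moves : String) (out : Int × Int) : Prop := out = taxi_zum_zum_alt moves
instance (moves : String) (out : Int × Int) : Decidable (Spec_taxi_zum_zum moves out) := by unfold Spec_taxi_zum_zum; infer_instance

-- ===== CLAIM (what is proved, stated in full; the proofs are below) =====
def Claim_equal_taxi_zum_zum : Prop := ∀ (moves : String), Dom_taxi_zum_zum moves → Spec_taxi_zum_zum moves (taxi_zum_zum moves)

-- ===== LEMMAS AND PROOFS =====

-- rotate a displacement from the local frame of heading h (0..3) into the world frame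
def pvRot (h : Int) (v : Int × Int) : Int × Int :=
  if h = 0 then v else if h = 1 then (-v.2, v.1) else if h = 2 then (-v.1, -v.2) else (v.2, -v.1)

-- B's backward fold written as a foldr (= foldl over the reversed list)
def pvG (l : List Char) : Int × Int := l.foldr (fun m acc => pvStepB acc m) (0, 0)

theorem pvG_eq (l : List Char) : l.reverse.foldl pvStepB (0, 0) = pvG l := by
  simp [pvG, List.foldl_reverse]

theorem pvRot_R (hed : Int) (h0 : 0 ≤ hed) (h4 : hed < 4) (v : Int × Int) :
    pvRot (PySem.Int.mod (hed - 1) 4) v = pvRot hed (v.2, -v.1) := by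
  interval_cases hed <;>
    simp [pvRot, PySem.Int.mod, show Int.fmod (-1) 4 = 3 from by decide,
      show Int.fmod 0 4 = 0 from by decide, show Int.fmod 1 4 = 1 from by decide,
      show Int.fmod 2 4 = 2 from by decide]

theorem pvRot_L (hed : Int) (h0 : 0 ≤ hed) (h4 : hed < 4) (v : Int × Int) :
    pvRot (PySem.Int.mod (hed + 1) 4) v = pvRot hed (-v.2, v.1) := by
  interval_cases hed <;>
    simp [pvRot, PySem.Int.mod, show Int.fmod 1 4 = 1 from by decide,
      show Int.fmod 2 4 = 2 from by decide, show Int.fmod 3 4 = 3 from by decide]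

theorem pvRot_F (hed : Int) (h0 : 0 ≤ hed) (h4 : hed < 4) (v : Int × Int) :
    pvRot hed (v.1, v.2 + 1)
      = (((PySem.List.pyGet? pvDvA hed).getD (0, 0)).1 + (pvRot hed v).1,
         ((PySem.List.pyGet? pvDvA hed).getD (0, 0)).2 + (pvRot hed v).2) := by
  interval_cases hed <;> simp [pvRot, pvDvA, PySem.List.pyGet?, PySem.List.pyIdx?] <;> ring_nf

-- loop invariant: A's fold from (pos, hed) ends at pos plus the suffix displacement
-- pvG l rotated into heading hed's frame
theorem pvFold_agree (l : List Char) (pos : Int × Int) (hed : Int)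
    (h0 : 0 ≤ hed) (h4 : hed < 4) :
    (l.foldl pvStepA (pos, hed)).1
      = (pos.1 + (pvRot hed (pvG l)).1, pos.2 + (pvRot hed (pvG l)).2) := by
  induction l generalizing pos hed with
  | nil => simp [pvG, pvRot]
  | cons m t ih =>
    simp only [List.foldl_cons]
    have hG : pvG (m :: t) = pvStepB (pvG t) m := rfl
    by_cases hR : m = 'R'
    · have : pvStepA (pos, hed) m = (pos, PySem.Int.mod (hed - 1) 4) := by simp [pvStepA, hR]
      rw [this, ih pos _ (PySem.Int.mod_nonneg _ (by norm_num)) (PySem.Int.mod_lt _ (by norm_num)),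
        pvRot_R hed h0 h4 (pvG t), hG]
      simp [pvStepB, hR]
    · by_cases hL : m = 'L'
      · have : pvStepA (pos, hed) m = (pos, PySem.Int.mod (hed + 1) 4) := by simp [pvStepA, hL]
        rw [this, ih pos _ (PySem.Int.mod_nonneg _ (by norm_num)) (PySem.Int.mod_lt _ (by norm_num)),
          pvRot_L hed h0 h4 (pvG t), hG]
        simp [pvStepB, hL]
      · set d := (PySem.List.pyGet? pvDvA hed).getD (0, 0) with hd
        have : pvStepA (pos, hed) m = ((pos.1 + d.1, pos.2 + d.2), hed) := by
          simp [pvStepA, hR, hL, hd]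
        rw [this, ih _ hed h0 h4, hG]
        have hB : pvStepB (pvG t) m = ((pvG t).1, (pvG t).2 + 1) := by simp [pvStepB, hR, hL]
        rw [hB, pvRot_F hed h0 h4, ← hd]
        simp only [Prod.mk.injEq]
        constructor <;> ring
        
-- ===== VERDICT (by name: the statement is the Claim_ definition above) =====
theorem taxi_zum_zum_spec : Claim_equal_taxi_zum_zum := by
  intro moves _
  show taxi_zum_zum moves = taxi_zum_zum_alt moves
  rw [taxi_zum_zum, taxi_zum_zum_alt, pvG_eq,
    pvFold_agree moves.toList (0, 0) 0 (by norm_num) (by norm_num)]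
  simp [pvRot]
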